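-- pv_equiv track=rewrite | github.com/mariiio/rally-cut | analysis/scripts/diagnose_cross_team_birth.py | _find_best_permutation
-- ===== SOURCE A (Python) =====
-- import itertools
--
-- def _find_best_permutation(
--     gt_rallies: dict[str, dict[str, int]],
--     pred_rallies: dict[str, dict[str, int]],
-- ) -> dict[int, int]:
--     player_ids = [1, 2, 3, 4]
--     best_perm: dict[int, int] = {pid: pid for pid in player_ids}
--     best_c = -1
--     for perm in itertools.permutations(player_ids):
--         pm = {pid: gt for pid, gt in zip(player_ids, perm)}
--         c = 0
--         for rid, gt_map in gt_rallies.items():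
--             pred_map = pred_rallies.get(rid, {})
--             for tid in gt_map:
--                 if tid in pred_map and pm.get(pred_map[tid]) == gt_map[tid]:
--                     c += 1
--         if c > best_c:
--             best_c = c
--             best_perm = pm
--     return best_perm
-- ===== SOURCE B (Python) =====
-- import itertools
--
--
-- def _find_best_permutation(
--     gt_rallies: dict[str, dict[str, int]],
--     pred_rallies: dict[str, dict[str, int]],
-- ) -> dict[int, int]:
--     # One pass over the data: 4x4 matrix counts[(pred_id, gt_id)] = how many
--     # (rally, track) pairs predict pred_id where ground truth says gt_id.
--     counts: dict[tuple[int, int], int] = {}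
--     for rid, gt_map in gt_rallies.items():
--         pred_map = pred_rallies.get(rid, {})
--         for tid, gv in gt_map.items():
--             pv = pred_map.get(tid)
--             if pv is not None and 1 <= pv <= 4 and 1 <= gv <= 4:
--                 counts[(pv, gv)] = counts.get((pv, gv), 0) + 1
--     # Score each of the 24 permutations from the matrix alone.
--     best_perm, best_c = (1, 2, 3, 4), -1
--     for perm in itertools.permutations((1, 2, 3, 4)):
--         c = sum(counts.get((p, g), 0) for p, g in zip((1, 2, 3, 4), perm))
--         if c > best_c:
--             best_perm, best_c = perm, c
--     return {pid: g for pid, g in zip((1, 2, 3, 4), best_perm)}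
-- ===== Notes on version B (the rewrite author's own statement) =====
-- stated objective: faster
-- what changed: A rescans every rally for each of the 24 permutations; B makes one pass over the data building a 4x4 matrix of (predicted id, ground-truth id) match counts and then scores each permutation from the matrix alone (4 lookups per permutation), with identical tie-breaking (first permutation in itertools order wins).
import Mathlib
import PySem

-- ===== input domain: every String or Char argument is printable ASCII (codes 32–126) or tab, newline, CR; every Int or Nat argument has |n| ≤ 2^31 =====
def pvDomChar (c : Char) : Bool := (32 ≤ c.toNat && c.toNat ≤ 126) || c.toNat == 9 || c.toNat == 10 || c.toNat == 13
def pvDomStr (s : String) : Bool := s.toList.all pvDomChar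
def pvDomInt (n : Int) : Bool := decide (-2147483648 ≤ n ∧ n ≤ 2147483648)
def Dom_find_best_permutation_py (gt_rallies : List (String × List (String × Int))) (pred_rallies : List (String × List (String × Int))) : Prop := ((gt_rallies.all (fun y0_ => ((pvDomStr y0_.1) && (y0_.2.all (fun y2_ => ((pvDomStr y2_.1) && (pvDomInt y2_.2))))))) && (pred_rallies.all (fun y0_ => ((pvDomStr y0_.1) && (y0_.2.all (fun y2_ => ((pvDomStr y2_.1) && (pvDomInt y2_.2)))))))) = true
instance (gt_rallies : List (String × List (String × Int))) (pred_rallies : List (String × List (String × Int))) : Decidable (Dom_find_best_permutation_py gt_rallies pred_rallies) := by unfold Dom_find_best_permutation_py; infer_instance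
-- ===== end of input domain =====

-- B replaces A's 24 full passes over the data by ONE pass building a 4x4 match-count
-- matrix, then scores each permutation from the matrix alone (objective: faster, constant factor).

-- ===== PORT A =====
def find_best_permutation_py (gt_rallies : List (String × List (String × Int))) (pred_rallies : List (String × List (String × Int))) : List (Int × Int) :=
  let player_ids : List Int := [1, 2, 3, 4]
  let init : PySem.Dict Int Int := PySem.Dict.ofList (player_ids.map (fun pid => (pid, pid)))
  let st := (PySem.List.permutations player_ids 4).foldl
    (fun (st : PySem.Dict Int Int × Int) perm =>
      let pm : PySem.Dict Int Int := PySem.Dict.ofList (player_ids.zip perm)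
      let c : Int := gt_rallies.foldl (fun c rp =>
          let pred_map : List (String × Int) := ((PySem.Dict.mk pred_rallies).get? rp.1).getD []
          (rp.2.map (fun p => p.1)).foldl (fun c tid =>
            match (PySem.Dict.mk pred_map).get? tid, (PySem.Dict.mk rp.2).get? tid with
            | some pv, some gv => if pm.get? pv = some gv then c + 1 else c
            | _, _ => c) c) 0
      if c > st.2 then (pm, c) else st)
    (init, -1)
  st.1.items

-- ===== PORT B =====
def find_best_permutation_py_alt (gt_rallies : List (String × List (String × Int))) (pred_rallies : List (String × List (String × Int))) : List (Int × Int) :=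
  let counts : PySem.Dict (Int × Int) Int :=
    gt_rallies.foldl (fun counts rp =>
      let pred_map : List (String × Int) := ((PySem.Dict.mk pred_rallies).get? rp.1).getD []
      rp.2.foldl (fun counts (tg : String × Int) =>
        match (PySem.Dict.mk pred_map).get? tg.1 with
        | some pv =>
          if 1 ≤ pv ∧ pv ≤ 4 ∧ 1 ≤ tg.2 ∧ tg.2 ≤ 4 then
            counts.insert (pv, tg.2) (counts.getD (pv, tg.2) 0 + 1)
          else counts
        | none => counts) counts) PySem.Dict.empty
  let st := (PySem.List.permutations ([1, 2, 3, 4] : List Int) 4).foldl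
    (fun (st : List Int × Int) perm =>
      let c : Int := ((([1, 2, 3, 4] : List Int).zip perm).map (fun pg => counts.getD pg 0)).sum
      if c > st.2 then (perm, c) else st)
    (([1, 2, 3, 4] : List Int), -1)
  ([1, 2, 3, 4] : List Int).zip st.1

-- ===== PRECONDITION & SPEC =====
-- Pre_ excludes association lists with duplicate keys (at either level): those do not
-- represent any Python dict argument — Python collapses the duplicates before A runs —
-- so the list encoding's first-match behaviour there is accidental.
def Pre_find_best_permutation_py (gt_rallies : List (String × List (String × Int))) (pred_rallies : List (String × List (String × Int))) : Prop :=
  (gt_rallies.map (fun rp => rp.1)).Nodup ∧ (∀ rp ∈ gt_rallies, (rp.2.map (fun p => p.1)).Nodup) ∧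
  (pred_rallies.map (fun rp => rp.1)).Nodup ∧ (∀ rp ∈ pred_rallies, (rp.2.map (fun p => p.1)).Nodup)
instance (gt_rallies : List (String × List (String × Int))) (pred_rallies : List (String × List (String × Int))) : Decidable (Pre_find_best_permutation_py gt_rallies pred_rallies) := by unfold Pre_find_best_permutation_py; infer_instance
def pvWitness_find_best_permutation_py : (List (String × List (String × Int))) × (List (String × List (String × Int))) :=
  ([("a", [("x", 1), ("y", 2)])], [("a", [("x", 2), ("y", 1)])])
def Spec_find_best_permutation_py (gt_rallies : List (String × List (String × Int))) (pred_rallies : List (String × List (String × Int))) (out : List (Int × Int)) : Prop := out = find_best_permutation_py_alt gt_rallies pred_rallies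
instance (gt_rallies : List (String × List (String × Int))) (pred_rallies : List (String × List (String × Int))) (out : List (Int × Int)) : Decidable (Spec_find_best_permutation_py gt_rallies pred_rallies out) := by unfold Spec_find_best_permutation_py; infer_instance

-- ===== CLAIM (what is proved, stated in full; the proofs are below) =====
def Claim_equal_find_best_permutation_py : Prop := ∀ (gt_rallies : List (String × List (String × Int))) (pred_rallies : List (String × List (String × Int))), Dom_find_best_permutation_py gt_rallies pred_rallies → Pre_find_best_permutation_py gt_rallies pred_rallies → Spec_find_best_permutation_py gt_rallies pred_rallies (find_best_permutation_py gt_rallies pred_rallies)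

-- ===== LEMMAS AND PROOFS =====
def pvPmap (pred_rallies : List (String × List (String × Int))) (rid : String) : List (String × Int) :=
  ((PySem.Dict.mk pred_rallies).get? rid).getD []
def pvEvent (pmap : List (String × Int)) (tg : String × Int) : Option (Int × Int) :=
  match (PySem.Dict.mk pmap).get? tg.1 with
  | some pv => if 1 ≤ pv ∧ pv ≤ 4 ∧ 1 ≤ tg.2 ∧ tg.2 ≤ 4 then some (pv, tg.2) else none
  | none => none
def pvEvents (pred_rallies : List (String × List (String × Int))) (rp : String × List (String × Int)) : List (Int × Int) :=
  rp.2.filterMap (pvEvent (pvPmap pred_rallies rp.1))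

lemma pv_step_eq (pmap : List (String × Int)) :
    (fun (counts : PySem.Dict (Int × Int) Int) (tg : String × Int) =>
      match (PySem.Dict.mk pmap).get? tg.1 with
      | some pv =>
        if 1 ≤ pv ∧ pv ≤ 4 ∧ 1 ≤ tg.2 ∧ tg.2 ≤ 4 then
          counts.insert (pv, tg.2) (counts.getD (pv, tg.2) 0 + 1)
        else counts
      | none => counts)
    = (fun counts tg =>
      match pvEvent pmap tg with
      | some e => counts.insert e (counts.getD e 0 + 1)
      | none => counts) := by
  funext counts tg
  unfold pvEvent
  cases h : (PySem.Dict.mk pmap).get? tg.1 with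
  | none => simp
  | some pv => by_cases hg : 1 ≤ pv ∧ pv ≤ 4 ∧ 1 ≤ tg.2 ∧ tg.2 ≤ 4 <;> simp [hg]

lemma pv_foldl_insert_count (f : (String × Int) → Option (Int × Int)) :
    ∀ (m : List (String × Int)) (d : PySem.Dict (Int × Int) Int) (v : Int × Int),
    (m.foldl (fun (counts : PySem.Dict (Int × Int) Int) tg =>
      match f tg with
      | some e => counts.insert e (counts.getD e 0 + 1)
      | none => counts) d).getD v 0
    = d.getD v 0 + ((m.filterMap f).count v : Int) := by
  intro m
  induction m with
  | nil => intro d v; simp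
  | cons tg m ih =>
    intro d v
    cases h : f tg with
    | none => simp only [List.foldl_cons, h, List.filterMap_cons_none h]; exact ih d v
    | some e =>
      simp only [List.foldl_cons, h, List.filterMap_cons_some h]
      rw [ih, PySem.Dict.getD_insert, List.count_cons]
      by_cases hv : v = e
      · subst hv
        simp only [BEq.rfl, if_true]
        push_cast
        ring
      · have : (e == v) = false := by simp [Ne.symm hv]
        simp [hv, this]

lemma pv_inner_counts (pmap : List (String × Int)) (m : List (String × Int))
    (d : PySem.Dict (Int × Int) Int) (v : Int × Int) :
    (m.foldl (fun (counts : PySem.Dict (Int × Int) Int) (tg : String × Int) =>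
      match (PySem.Dict.mk pmap).get? tg.1 with
      | some pv =>
        if 1 ≤ pv ∧ pv ≤ 4 ∧ 1 ≤ tg.2 ∧ tg.2 ≤ 4 then
          counts.insert (pv, tg.2) (counts.getD (pv, tg.2) 0 + 1)
        else counts
      | none => counts) d).getD v 0
    = d.getD v 0 + ((m.filterMap (pvEvent pmap)).count v : Int) := by
  rw [pv_step_eq]
  exact pv_foldl_insert_count (pvEvent pmap) m d v

def pvIds : List Int := [1, 2, 3, 4]

lemma pv_sum_count (E zp : List (Int × Int)) (h : zp.Nodup) :
    (zp.map (fun pg => (E.count pg : Int))).sum = (E.countP (fun e => decide (e ∈ zp)) : Int) := by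
  induction E with
  | nil => simp
  | cons e E ih =>
    have h2 : (zp.map (fun pg => ((if e == pg then 1 else 0 : Nat) : Int))).sum
        = ((zp.countP (fun pg => e == pg) : Nat) : Int) := by
      rw [← PySem.List.sum_map_ite_one_zero (fun pg => e == pg) zp]
      simp
    have hsplit : (zp.map (fun pg => (List.count pg (e :: E) : Int))).sum
        = (zp.map (fun pg => (List.count pg E : Int))).sum
          + (zp.map (fun pg => ((if e == pg then 1 else 0 : Nat) : Int))).sum := by
      rw [← List.sum_map_add]
      refine congrArg List.sum (List.map_congr_left ?_)
      intro pg _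
      rw [List.count_cons]
      push_cast
      ring
    have h3 : zp.countP (fun pg => e == pg) = zp.count e := by
      rw [List.count_eq_countP]
      exact List.countP_congr (by intro x _; simp only [beq_iff_eq]; exact eq_comm)
    rw [hsplit, ih, h2, h3, List.Nodup.count h, List.countP_cons]
    by_cases hm : e ∈ zp
    · simp only [hm, decide_true, if_true]
      push_cast
      ring
    · simp only [hm, decide_false, if_false]
      push_cast
      ring

def pvMatch (pm : PySem.Dict Int Int) (pmap : List (String × Int)) (tg : String × Int) : Bool :=
  match (PySem.Dict.mk pmap).get? tg.1 with
  | some pv => decide (pm.get? pv = some tg.2)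
  | none => false

lemma pv_inner_A (pmap : List (String × Int)) (pm : PySem.Dict Int Int)
    (m : List (String × Int)) (hnd : (m.map (fun p => p.1)).Nodup) (c : Int) :
    (m.map (fun p => p.1)).foldl (fun c tid =>
        match (PySem.Dict.mk pmap).get? tid, (PySem.Dict.mk m).get? tid with
        | some pv, some gv => if pm.get? pv = some gv then c + 1 else c
        | _, _ => c) c
      = c + (m.countP (pvMatch pm pmap) : Int) := by
  rw [List.foldl_map]
  rw [PySem.List.foldl_congr_mem m _ (fun c tg => if pvMatch pm pmap tg then c + 1 else c) c ?_]
  · exact PySem.List.foldl_count_if _ _ _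
  · intro acc tg htg
    have hkey : (PySem.Dict.mk m).get? tg.1 = some tg.2 := by
      apply PySem.Dict.get?_of_mem_items
      · exact htg
      · simpa [PySem.Dict.keys, PySem.Dict.items] using hnd
    rw [hkey]
    unfold pvMatch
    cases h : (PySem.Dict.mk pmap).get? tg.1 with
    | none => simp [h]
    | some pv => by_cases hc : pm.get? pv = some tg.2 <;> simp [h, hc]

lemma pv_nodup_map_fst_zip (l1 : List Int) (l2 : List Int) (h : l1.Nodup) :
    ((l1.zip l2).map Prod.fst).Nodup := by
  induction l1 generalizing l2 with
  | nil => simp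
  | cons a l1 ih =>
    cases l2 with
    | nil => simp
    | cons b l2 =>
      simp only [List.zip_cons_cons, List.map_cons, List.nodup_cons] at *
      refine ⟨fun hm => ?_, ih l2 h.2⟩
      obtain ⟨⟨x, y⟩, hxy, hx⟩ := List.mem_map.mp hm
      cases hx
      exact h.1 (List.of_mem_zip hxy).1

lemma pv_items_ofList_zip (q : List Int) :
    (PySem.Dict.ofList (pvIds.zip q)).items = pvIds.zip q := by
  have h := PySem.Dict.items_foldl_insert_fresh (pvIds.zip q) Prod.fst Prod.snd PySem.Dict.empty
    (by intro a _; simp [PySem.Dict.contains_empty])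
    (pv_nodup_map_fst_zip pvIds q (by decide))
  simpa [PySem.Dict.ofList, PySem.Dict.update, PySem.Dict.items] using h

lemma pv_get?_ofList_zip (q : List Int) (k v : Int) :
    (PySem.Dict.ofList (pvIds.zip q)).get? k = some v ↔ (k, v) ∈ pvIds.zip q := by
  rw [PySem.Dict.get?_eq_some_iff_mem_items _ _ _ (PySem.Dict.nodup_keys_ofList _),
    pv_items_ofList_zip]

lemma pv_rally_count (pred_rallies : List (String × List (String × Int)))
    (rp : String × List (String × Int)) (p : List Int)
    (hrange : ∀ g ∈ p, 1 ≤ g ∧ g ≤ 4) :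
    rp.2.countP (pvMatch (PySem.Dict.ofList (pvIds.zip p)) (pvPmap pred_rallies rp.1))
      = (pvEvents pred_rallies rp).countP (fun e => decide (e ∈ pvIds.zip p)) := by
  unfold pvEvents
  rw [List.countP_filterMap]
  apply List.countP_congr
  intro tg _
  unfold pvMatch pvEvent
  cases h : (PySem.Dict.mk (pvPmap pred_rallies rp.1)).get? tg.1 with
  | none => simp
  | some pv =>
    by_cases hg : 1 ≤ pv ∧ pv ≤ 4 ∧ 1 ≤ tg.2 ∧ tg.2 ≤ 4
    · simp [hg, pv_get?_ofList_zip]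
    · simp only [hg, if_false, Option.map_none, Option.getD_none, decide_eq_true_eq]
      constructor
      · intro hmem
        exfalso
        rw [pv_get?_ofList_zip] at hmem
        have h1 : pv ∈ pvIds := (List.of_mem_zip hmem).1
        have h2 : tg.2 ∈ p := (List.of_mem_zip hmem).2
        have h3 : 1 ≤ pv ∧ pv ≤ 4 := by
          have : ∀ x ∈ pvIds, 1 ≤ x ∧ x ≤ 4 := by decide
          exact this pv h1
        exact hg ⟨h3.1, h3.2, (hrange tg.2 h2).1, (hrange tg.2 h2).2⟩
      · intro hfalse
        exact absurd hfalse (by simp)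

def pvCounts (gt_rallies pred_rallies : List (String × List (String × Int))) : PySem.Dict (Int × Int) Int :=
  gt_rallies.foldl (fun counts rp =>
    rp.2.foldl (fun counts (tg : String × Int) =>
      match (PySem.Dict.mk (pvPmap pred_rallies rp.1)).get? tg.1 with
      | some pv =>
        if 1 ≤ pv ∧ pv ≤ 4 ∧ 1 ≤ tg.2 ∧ tg.2 ≤ 4 then
          counts.insert (pv, tg.2) (counts.getD (pv, tg.2) 0 + 1)
        else counts
      | none => counts) counts) PySem.Dict.empty

def pvScoreA (gt_rallies pred_rallies : List (String × List (String × Int))) (pm : PySem.Dict Int Int) : Int :=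
  gt_rallies.foldl (fun c rp =>
    (rp.2.map (fun p => p.1)).foldl (fun c tid =>
      match (PySem.Dict.mk (pvPmap pred_rallies rp.1)).get? tid, (PySem.Dict.mk rp.2).get? tid with
      | some pv, some gv => if pm.get? pv = some gv then c + 1 else c
      | _, _ => c) c) 0

lemma pv_counts_getD_aux (pred_rallies : List (String × List (String × Int))) (v : Int × Int) :
    ∀ (gt_rallies : List (String × List (String × Int))) (d : PySem.Dict (Int × Int) Int),
    (gt_rallies.foldl (fun counts rp =>
      rp.2.foldl (fun counts (tg : String × Int) =>
        match (PySem.Dict.mk (pvPmap pred_rallies rp.1)).get? tg.1 with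
        | some pv =>
          if 1 ≤ pv ∧ pv ≤ 4 ∧ 1 ≤ tg.2 ∧ tg.2 ≤ 4 then
            counts.insert (pv, tg.2) (counts.getD (pv, tg.2) 0 + 1)
          else counts
        | none => counts) counts) d).getD v 0
      = d.getD v 0 + ((gt_rallies.flatMap (pvEvents pred_rallies)).count v : Int) := by
  intro gt_rallies
  induction gt_rallies with
  | nil => intro d; simp
  | cons rp gt ih =>
    intro d
    rw [List.foldl_cons, ih, pv_inner_counts, List.flatMap_cons, List.count_append]
    simp only [pvEvents]
    push_cast
    ring

lemma pv_counts_getD (gt_rallies pred_rallies : List (String × List (String × Int))) (v : Int × Int) :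
    (pvCounts gt_rallies pred_rallies).getD v 0
      = ((gt_rallies.flatMap (pvEvents pred_rallies)).count v : Int) := by
  have h := pv_counts_getD_aux pred_rallies v gt_rallies PySem.Dict.empty
  simpa [pvCounts, PySem.Dict.getD_empty] using h

lemma pv_score_eq (gt_rallies pred_rallies : List (String × List (String × Int)))
    (hpre : ∀ rp ∈ gt_rallies, (rp.2.map (fun p => p.1)).Nodup)
    (p : List Int) (hrange : ∀ g ∈ p, 1 ≤ g ∧ g ≤ 4) (hnd : (pvIds.zip p).Nodup) :
    pvScoreA gt_rallies pred_rallies (PySem.Dict.ofList (pvIds.zip p))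
      = ((pvIds.zip p).map (fun pg => (pvCounts gt_rallies pred_rallies).getD pg 0)).sum := by
  have hB : ((pvIds.zip p).map (fun pg => (pvCounts gt_rallies pred_rallies).getD pg 0)).sum
      = (((gt_rallies.flatMap (pvEvents pred_rallies)).countP (fun e => decide (e ∈ pvIds.zip p)) : Nat) : Int) := by
    rw [List.map_congr_left (fun pg _ => pv_counts_getD gt_rallies pred_rallies pg)]
    exact pv_sum_count _ _ hnd
  rw [hB]
  unfold pvScoreA
  rw [PySem.List.foldl_congr_mem gt_rallies _
    (fun c rp => c + ((rp.2.countP (pvMatch (PySem.Dict.ofList (pvIds.zip p)) (pvPmap pred_rallies rp.1)) : Nat) : Int)) 0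
    (fun c rp hrp => pv_inner_A (pvPmap pred_rallies rp.1) _ rp.2 (hpre rp hrp) c)]
  rw [PySem.List.foldl_add]
  rw [List.map_congr_left (fun rp (hrp : rp ∈ gt_rallies) =>
    congrArg (fun n : Nat => (n : Int)) (pv_rally_count pred_rallies rp p hrange))]
  rw [List.countP_flatMap, Nat.cast_list_sum, List.map_map]
  simp only [Function.comp_def, zero_add]

-- the selection fold: A's fold over (pm, score) mirrors B's fold over (perm, score)
lemma pv_sel (F : PySem.Dict Int Int → Int) (G : List Int → Int) :
    ∀ (ps : List (List Int)) (q : List Int) (v : Int),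
    (∀ p ∈ ps, F (PySem.Dict.ofList (pvIds.zip p)) = G p) →
    ps.foldl (fun st perm =>
        if F (PySem.Dict.ofList (pvIds.zip perm)) > st.2
        then (PySem.Dict.ofList (pvIds.zip perm), F (PySem.Dict.ofList (pvIds.zip perm)))
        else st) (PySem.Dict.ofList (pvIds.zip q), v)
      = ((PySem.Dict.ofList (pvIds.zip (ps.foldl (fun st perm => if G perm > st.2 then (perm, G perm) else st) (q, v)).1)),
         (ps.foldl (fun st perm => if G perm > st.2 then (perm, G perm) else st) (q, v)).2) := by
  intro ps
  induction ps with
  | nil => intro q v _; rfl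
  | cons p ps ih =>
    intro q v h
    simp only [List.foldl_cons, h p (by simp)]
    by_cases hc : G p > v
    · simpa [hc] using ih p (G p) (fun r hr => h r (by simp [hr]))
    · simpa [hc] using ih q v (fun r hr => h r (by simp [hr]))

-- ===== VERDICT (by name: the statement is the Claim_ definition above) =====
theorem find_best_permutation_py_spec : Claim_equal_find_best_permutation_py := by
  intro gt_rallies pred_rallies _ hpre
  unfold Spec_find_best_permutation_py
  have hA : find_best_permutation_py gt_rallies pred_rallies
      = ((PySem.List.permutations pvIds 4).foldl (fun st perm =>
          if pvScoreA gt_rallies pred_rallies (PySem.Dict.ofList (pvIds.zip perm)) > st.2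
          then (PySem.Dict.ofList (pvIds.zip perm), pvScoreA gt_rallies pred_rallies (PySem.Dict.ofList (pvIds.zip perm)))
          else st) (PySem.Dict.ofList (pvIds.zip pvIds), -1)).1.items := rfl
  have hB : find_best_permutation_py_alt gt_rallies pred_rallies
      = pvIds.zip ((PySem.List.permutations pvIds 4).foldl (fun st perm =>
          if ((pvIds.zip perm).map (fun pg => (pvCounts gt_rallies pred_rallies).getD pg 0)).sum > st.2
          then (perm, ((pvIds.zip perm).map (fun pg => (pvCounts gt_rallies pred_rallies).getD pg 0)).sum)
          else st) (pvIds, -1)).1 := by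
    unfold find_best_permutation_py_alt pvCounts pvPmap pvIds; rfl
  rw [hA, hB]
  have hperm : ∀ p ∈ PySem.List.permutations pvIds 4,
      (∀ g ∈ p, 1 ≤ g ∧ g ≤ 4) ∧ (pvIds.zip p).Nodup := by decide
  rw [pv_sel _ _ _ _ _ (fun p hp =>
    pv_score_eq gt_rallies pred_rallies hpre.2.1 p (hperm p hp).1 (hperm p hp).2)]
  rw [pv_items_ofList_zip]
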